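-- pv_equiv track=rewrite | github.com/JttWest/AdventOfCode | 8/solution1.py | parse_image
-- ===== SOURCE A (Python) =====
-- def parse_image(pixels, start_i, end_i):
--   num_0 = 0
--   num_1 = 0
--   num_2 = 0
--   for i in range(start_i, end_i):
--     d = pixels[i]
--     if d == '0':
--       num_0 += 1
--     elif d == '1':
--       num_1 += 1
--     elif d == '2':
--       num_2 += 1
--
--   return (num_0, num_1, num_2)
-- ===== SOURCE B (Python) =====
-- def parse_image(pixels, start_i, end_i):
--   seg = pixels[start_i:end_i]
--   return (seg.count('0'), seg.count('1'), seg.count('2'))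
-- ===== Notes on version B (the rewrite author's own statement) =====
-- stated objective: idiomatic
-- what changed: Replaces the single index-by-index loop with elif branches by slicing once and letting three independent str.count scans over the slice produce the triple.
-- outside the precondition, e.g. on parse_image('012', -3, 2): A returns (2, 2, 1), B returns (1, 1, 0); on parse_image('012', 1, -1): A returns (0, 0, 0), B returns (0, 1, 0)
import Mathlib
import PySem

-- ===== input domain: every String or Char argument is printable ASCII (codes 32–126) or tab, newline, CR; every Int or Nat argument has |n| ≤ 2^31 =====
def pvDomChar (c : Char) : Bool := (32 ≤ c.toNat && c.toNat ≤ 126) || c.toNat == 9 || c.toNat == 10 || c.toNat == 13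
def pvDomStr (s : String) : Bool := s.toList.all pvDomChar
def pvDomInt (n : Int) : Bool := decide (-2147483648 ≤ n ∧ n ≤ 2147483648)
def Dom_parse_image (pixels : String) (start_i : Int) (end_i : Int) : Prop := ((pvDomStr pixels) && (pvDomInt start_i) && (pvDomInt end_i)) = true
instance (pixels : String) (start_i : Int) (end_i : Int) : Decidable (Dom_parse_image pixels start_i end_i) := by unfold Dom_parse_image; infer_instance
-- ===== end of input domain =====

-- B slices once and counts '0','1','2' with three str.count passes instead of A's
-- single index-by-index loop with elif branches (objective: more idiomatic; same O(n) cost).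

-- ===== PORT A =====
-- literal transliteration of A: for i in range(start_i, end_i): d = pixels[i]; if/elif chain
def parse_image (pixels : String) (start_i : Int) (end_i : Int) : Int × Int × Int :=
  (PySem.List.pyRange start_i end_i 1).foldl
    (fun (acc : Int × Int × Int) (i : Int) =>
      let d := PySem.Str.pyGet? pixels i   -- none = IndexError, excluded by Pre_
      if d = some '0' then (acc.1 + 1, acc.2.1, acc.2.2)
      else if d = some '1' then (acc.1, acc.2.1 + 1, acc.2.2)
      else if d = some '2' then (acc.1, acc.2.1, acc.2.2 + 1)
      else acc)
    (0, 0, 0)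

-- ===== PORT B =====
-- literal transliteration of Source B: seg = pixels[start_i:end_i]; (seg.count('0'), seg.count('1'), seg.count('2'))
def parse_image_alt (pixels : String) (start_i : Int) (end_i : Int) : Int × Int × Int :=
  let seg := PySem.Str.slice pixels (some start_i) (some end_i)
  ((PySem.Str.count seg "0" : Int), (PySem.Str.count seg "1" : Int), (PySem.Str.count seg "2" : Int))

-- ===== PRECONDITION & SPEC =====
-- Pre_ excludes (a) forward ranges reaching an out-of-range index, where A raises IndexError,
-- and (b) inputs with a negative index whose behaviour diverges between the two equally
-- defensible Python conventions: A's per-index wraparound (or an empty range(start,end))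
-- versus B's slice normalisation — an unspecified corner for this puzzle helper.
-- The second and third disjuncts keep inside Pre_ those negative-index inputs on which
-- the two conventions provably coincide (both give the empty segment).
def Pre_parse_image (pixels : String) (start_i : Int) (end_i : Int) : Prop :=
  (0 ≤ start_i ∧ 0 ≤ end_i ∧ (start_i < end_i → end_i ≤ (pixels.toList.length : Int)))
  ∨ (end_i ≤ start_i ∧ start_i < 0)
  ∨ (end_i < 0 ∧ 0 ≤ start_i ∧
      ((pixels.toList.length : Int) ≤ start_i ∨ end_i + (pixels.toList.length : Int) ≤ start_i))
instance (pixels : String) (start_i : Int) (end_i : Int) : Decidable (Pre_parse_image pixels start_i end_i) := by unfold Pre_parse_image; infer_instance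

def pvWitness_parse_image : String × Int × Int := ("0120", 1, 4)

def Spec_parse_image (pixels : String) (start_i : Int) (end_i : Int) (out : Int × Int × Int) : Prop := out = parse_image_alt pixels start_i end_i
instance (pixels : String) (start_i : Int) (end_i : Int) (out : Int × Int × Int) : Decidable (Spec_parse_image pixels start_i end_i out) := by unfold Spec_parse_image; infer_instance

-- ===== CLAIM (what is proved, stated in full; the proofs are below) =====
def Claim_equal_parse_image : Prop := ∀ (pixels : String) (start_i : Int) (end_i : Int), Dom_parse_image pixels start_i end_i → Pre_parse_image pixels start_i end_i → Spec_parse_image pixels start_i end_i (parse_image pixels start_i end_i)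

-- ===== LEMMAS AND PROOFS =====

-- single-character step shared by both analyses
def pvStepC (acc : Int × Int × Int) (c : Char) : Int × Int × Int :=
  if c = '0' then (acc.1 + 1, acc.2.1, acc.2.2)
  else if c = '1' then (acc.1, acc.2.1 + 1, acc.2.2)
  else if c = '2' then (acc.1, acc.2.1, acc.2.2 + 1)
  else acc

-- str.count with a single-character needle is List.count
theorem pvCountGoSingle (c : Char) : ∀ (l : List Char) (fuel acc : Nat), l.length ≤ fuel →
    PySem.Chars.count.go [c] fuel l acc = acc + l.count c := by
  intro l
  induction l with
  | nil => intro fuel acc _; cases fuel <;> simp [PySem.Chars.count.go]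
  | cons h t ih =>
    intro fuel acc hf
    cases fuel with
    | zero => simp at hf
    | succ n =>
      rw [PySem.Chars.count.go]
      by_cases hc : h = c
      · subst hc
        rw [if_pos (by simp [List.isPrefixOf])]
        simp only [List.length_cons, List.length_nil, Nat.zero_add, List.drop_succ_cons,
          List.drop_zero]
        rw [ih n (acc + 1) (by simpa using hf)]
        simp
        omega
      · rw [if_neg (by simp [List.isPrefixOf, Ne.symm hc])]
        rw [ih n acc (by simpa using hf)]
        simp [List.count_cons]
        exact hc

theorem pvCountSingle (l : List Char) (c : Char) :
    PySem.Chars.count l [c] = l.count c := by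
  simp [PySem.Chars.count, pvCountGoSingle c l l.length 0 le_rfl]

-- B's value is the triple of character counts of the slice
theorem pvAltEq (p : String) (s e : Int) :
    parse_image_alt p s e =
      (((PySem.List.slice p.toList (some s) (some e)).count '0' : Int),
       ((PySem.List.slice p.toList (some s) (some e)).count '1' : Int),
       ((PySem.List.slice p.toList (some s) (some e)).count '2' : Int)) := by
  simp [parse_image_alt, PySem.Str.count_eq, PySem.Str.slice, pvCountSingle]

-- folding pvStepC counts the three digits
theorem pvFoldCounts : ∀ (l : List Char) (acc : Int × Int × Int),
    l.foldl pvStepC acc = (acc.1 + l.count '0', acc.2.1 + l.count '1', acc.2.2 + l.count '2') := by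
  intro l
  induction l with
  | nil => intro acc; simp
  | cons h t ih =>
    intro acc
    simp only [List.foldl_cons, ih, pvStepC, List.count_cons]
    split_ifs with h0 h1 h2 <;> subst_eqs <;> simp <;> first | ring | simp_all

-- A's range loop over valid indices is the fold of pvStepC over the segment
theorem pvFoldA (p : String) : ∀ (n : Nat) (a : Int) (acc : Int × Int × Int), 0 ≤ a →
    a + (n : Int) ≤ (p.toList.length : Int) →
    (PySem.List.pyRange a (a + (n : Int)) 1).foldl
      (fun (acc : Int × Int × Int) (i : Int) =>
        let d := PySem.Str.pyGet? p i
        if d = some '0' then (acc.1 + 1, acc.2.1, acc.2.2)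
        else if d = some '1' then (acc.1, acc.2.1 + 1, acc.2.2)
        else if d = some '2' then (acc.1, acc.2.1, acc.2.2 + 1)
        else acc) acc
    = ((p.toList.drop a.toNat).take n).foldl pvStepC acc := by
  intro n
  induction n with
  | zero =>
    intro a acc ha _
    simp
  | succ m ih =>
    intro a acc ha hlen
    have halt : a < (p.toList.length : Int) := by push_cast at hlen ⊢; omega
    have hidx : a.toNat < p.toList.length := by omega
    have hget : PySem.List.pyGet? p.toList a = some (p.toList[a.toNat]) := by
      have h3 : PySem.List.pyIdx? p.toList.length a = some a.toNat := by
        simp only [PySem.List.pyIdx?]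
        rw [if_pos ha, if_pos (by omega)]
      simp only [PySem.List.pyGet?]
      rw [h3]
      simp [List.getElem?_eq_getElem hidx]
    rw [PySem.List.pyRange_one_cons (by push_cast; omega)]
    have hdrop : p.toList.drop a.toNat = p.toList[a.toNat] :: p.toList.drop (a.toNat + 1) :=
      List.drop_eq_getElem_cons hidx
    rw [hdrop]
    simp only [List.foldl_cons, List.take_succ_cons]
    have hrw : a + ((m + 1 : Nat) : Int) = (a + 1) + ((m : Nat) : Int) := by push_cast; ring
    rw [hrw]
    have ha1 : (a + 1).toNat = a.toNat + 1 := by omega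
    simp only [PySem.Str.pyGet?_eq, PySem.Chars.pyGet?_eq_listPyGet?, hget]
    have := ih (a + 1) (pvStepC acc (p.toList[a.toNat])) (by omega) (by push_cast at hlen ⊢; omega)
    rw [ha1] at this
    rw [← this]
    congr 1
    simp only [pvStepC, Option.some.injEq]

-- an empty slice under the Pre_ "empty range" disjuncts
theorem pvSliceNil (p : String) (s e : Int)
    (h : e ≤ s ∧ s < 0 ∨
         e < 0 ∧ 0 ≤ s ∧ ((p.toList.length : Int) ≤ s ∨ e + (p.toList.length : Int) ≤ s)) :
    PySem.List.slice p.toList (some s) (some e) = [] := by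
  apply List.eq_nil_of_length_eq_zero
  rw [PySem.List.length_slice]
  simp only [PySem.List.clampIdx]
  split_ifs <;> omega

-- ===== VERDICT (by name: the statement is the Claim_ definition above) =====
theorem parse_image_spec : Claim_equal_parse_image := by
  intro p s e _hdom hpre
  unfold Spec_parse_image
  rcases hpre with ⟨hs, he, hlt⟩ | h
  · -- non-negative bounds
    rw [pvAltEq, PySem.List.slice_toNat p.toList hs he]
    by_cases hse : s < e
    · have hn : e = s + (((e - s).toNat : Nat) : Int) := by omega
      have htn : (e - s).toNat = e.toNat - s.toNat := by omega
      rw [parse_image]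
      rw [hn, pvFoldA p (e - s).toNat s (0,0,0) hs (by rw [← hn]; exact hlt hse)]
      rw [pvFoldCounts, htn]
      simp [show ((s + ((e.toNat - s.toNat : Nat) : Int)).toNat - s.toNat) = e.toNat - s.toNat
        from by omega]
    · have h0 : e.toNat - s.toNat = 0 := by omega
      rw [parse_image, PySem.List.pyRange_one_eq_nil (by omega), h0]
      simp
  · -- empty range on A's side, empty slice on B's side
    have hes : e ≤ s := by rcases h with ⟨h1, _⟩ | ⟨h1, h2, _⟩ <;> omega
    rw [pvAltEq, pvSliceNil p s e h, parse_image, PySem.List.pyRange_one_eq_nil hes]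
    simp
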